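-- pv_equiv track=rewrite | github.com/gonzaedu61/ragtime | src/RAG_Server/rag_server.py | split_german_compound
-- ===== SOURCE A (Python) =====
-- from typing import List, Dict, Any
--
-- GERMAN_ROOTS = {
--     "stamm", "lohn", "daten", "kosten", "stelle", "stellen",
--     "personal", "art", "arten", "zeit", "plan", "auftrag",
--     "material", "artikel", "kunde", "adresse", "nummer",
--     "regel", "regelung", "kalkulation", "preis", "gruppe",
-- }
--
-- def split_german_compound(word: str) -> List[str]:
--     word = word.lower()
--     parts = []
--
--     i = 0
--     while i < len(word):
--         found = False
--         # try longest possible root first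
--         for j in range(len(word), i, -1):
--             segment = word[i:j]
--             if segment in GERMAN_ROOTS:
--                 parts.append(segment)
--                 i = j
--                 found = True
--                 break
--         if not found:
--             # fallback: consume one character
--             parts.append(word[i])
--             i += 1
--
--     # filter out single letters unless necessary
--     parts = [p for p in parts if len(p) > 1]
--     return parts
-- ===== SOURCE B (Python) =====
-- from typing import List
--
-- GERMAN_ROOTS = {
--     "stamm", "lohn", "daten", "kosten", "stelle", "stellen",
--     "personal", "art", "arten", "zeit", "plan", "auftrag",
--     "material", "artikel", "kunde", "adresse", "nummer",
--     "regel", "regelung", "kalkulation", "preis", "gruppe",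
-- }
--
-- _ROOTS = sorted(GERMAN_ROOTS)  # fixed iteration order for the indexing pass
--
--
-- def split_german_compound(word: str) -> List[str]:
--     w = word.lower()
--     n = len(w)
--
--     # stage 1: root-major indexing pass — for every root, record at each
--     # position where it occurs the length of the longest root starting there
--     best = {}
--     for r in _ROOTS:
--         L = len(r)
--         for i in range(n - L + 1):
--             if w.startswith(r, i) and best.get(i, 0) < L:
--                 best[i] = L
--
--     # stage 2: one linear walk over the match table
--     parts = []
--     i = 0
--     while i < n:
--         L = best.get(i, 0)
--         if L > 0:
--             parts.append(w[i:i + L])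
--             i += L
--         else:
--             i += 1
--     return parts
-- ===== Notes on version B (the rewrite author's own statement) =====
-- stated objective: faster
-- what changed: B is a two-stage algorithm: a root-major indexing pass (for each root, mark every position where it starts with the longest such root length in a dict) followed by one linear greedy walk over that table, instead of A's per-position downward scan over all candidate slice lengths with a final filter pass.
import Mathlib
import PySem

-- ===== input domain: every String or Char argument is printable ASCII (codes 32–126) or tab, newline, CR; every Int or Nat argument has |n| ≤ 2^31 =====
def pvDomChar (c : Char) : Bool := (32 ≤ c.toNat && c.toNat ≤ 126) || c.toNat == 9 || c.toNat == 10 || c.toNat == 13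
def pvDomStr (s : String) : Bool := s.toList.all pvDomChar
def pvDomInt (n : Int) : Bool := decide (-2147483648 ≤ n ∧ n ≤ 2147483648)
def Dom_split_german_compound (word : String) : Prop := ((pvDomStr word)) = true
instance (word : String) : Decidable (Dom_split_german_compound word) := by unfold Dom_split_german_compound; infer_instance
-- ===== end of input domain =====

-- B replaces A's per-position downward scan over candidate slice lengths (plus a final
-- filter pass) by a root-major indexing pass building a position→longest-match table,
-- followed by one linear greedy walk; objective: faster.

-- ===== PORT A =====
-- GERMAN_ROOTS, in A's literal order (membership test only)
def pvRootsSet : List (List Char) :=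
  ["stamm".toList, "lohn".toList, "daten".toList, "kosten".toList, "stelle".toList, "stellen".toList,
   "personal".toList, "art".toList, "arten".toList, "zeit".toList, "plan".toList, "auftrag".toList,
   "material".toList, "artikel".toList, "kunde".toList, "adresse".toList, "nummer".toList,
   "regel".toList, "regelung".toList, "kalkulation".toList, "preis".toList, "gruppe".toList]

-- inner 'for j in range(len(word), i, -1): if word[i:j] in GERMAN_ROOTS: … break'
def pvFindA (w : List Char) (i : Nat) : Nat → Option Nat
  | 0 => none
  | j + 1 =>
    if j + 1 ≤ i then none
    else if PySem.List.slice w (some (i : Int)) (some ((j + 1 : Nat) : Int)) ∈ pvRootsSet then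
      some (j + 1)
    else pvFindA w i j

-- cited by pvLoopA's decreasing_by
theorem pvFindA_some_bounds (w : List Char) (i : Nat) :
    ∀ j0 j, pvFindA w i j0 = some j → i < j ∧ j ≤ j0 := by
  intro j0
  induction j0 with
  | zero => intro j h; simp [pvFindA] at h
  | succ k ih =>
    intro j h
    unfold pvFindA at h
    split at h
    · exact absurd h (by simp)
    · split at h
      · cases h; omega
      · have := ih j h; omega

-- the while loop of A: append the found segment or the single character word[i]
def pvLoopA (w : List Char) (i : Nat) : List (List Char) :=
  if h : i < w.length then
    match hf : pvFindA w i w.length with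
    | some j => PySem.List.slice w (some (i : Int)) (some ((j : Nat) : Int)) :: pvLoopA w j
    | none => [w[i]] :: pvLoopA w (i + 1)
  else []
termination_by w.length - i
decreasing_by
  · have := pvFindA_some_bounds w i w.length j hf; omega
  · omega

def split_german_compound (word : String) : List String :=
  ((pvLoopA (PySem.Chars.lower word.toList) 0).filter (fun p => decide (1 < p.length))).map
    String.ofList

-- ===== PORT B =====
-- _ROOTS = sorted(GERMAN_ROOTS): the fixed iteration order of B's indexing pass
def pvRootsB : List (List Char) :=
  ["adresse".toList, "art".toList, "arten".toList, "artikel".toList, "auftrag".toList,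
   "daten".toList, "gruppe".toList, "kalkulation".toList, "kosten".toList, "kunde".toList,
   "lohn".toList, "material".toList, "nummer".toList, "personal".toList, "plan".toList,
   "preis".toList, "regel".toList, "regelung".toList, "stamm".toList, "stelle".toList,
   "stellen".toList, "zeit".toList]

-- inner 'for i in range(n - L + 1): if w.startswith(r, i) and best.get(i, 0) < L: best[i] = L'
def pvIndexRoot (w : List Char) (d : PySem.Dict Int Int) (r : List Char) : PySem.Dict Int Int :=
  (List.range (((w.length : Int) - (r.length : Int) + 1).toNat)).foldl
    (fun d i =>
      if PySem.Chars.startswith (w.drop i) r && decide (d.getD (i : Int) 0 < (r.length : Int)) then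
        d.insert (i : Int) (r.length : Int)
      else d) d

-- stage 1: 'best = {}; for r in _ROOTS: …'
def pvBuild (w : List Char) : PySem.Dict Int Int := pvRootsB.foldl (pvIndexRoot w) PySem.Dict.empty

-- stage 2: the linear greedy walk over the match table
def pvWalk (w : List Char) (d : PySem.Dict Int Int) (i : Nat) : List (List Char) :=
  if _h : i < w.length then
    let L := d.getD (i : Int) 0
    if hL : 0 < L then
      PySem.List.slice w (some (i : Int)) (some ((i : Int) + L)) :: pvWalk w d (i + L.toNat)
    else pvWalk w d (i + 1)
  else []
termination_by w.length - i
decreasing_by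
  · omega
  · omega

def split_german_compound_alt (word : String) : List String :=
  (pvWalk (PySem.Chars.lower word.toList) (pvBuild (PySem.Chars.lower word.toList)) 0).map
    String.ofList

-- ===== PRECONDITION & SPEC =====
def Spec_split_german_compound (word : String) (out : List String) : Prop := out = split_german_compound_alt word
instance (word : String) (out : List String) : Decidable (Spec_split_german_compound word out) := by unfold Spec_split_german_compound; infer_instance

-- ===== CLAIM (what is proved, stated in full; the proofs are below) =====
def Claim_equal_split_german_compound : Prop := ∀ (word : String), Dom_split_german_compound word → Spec_split_german_compound word (split_german_compound word)

-- ===== LEMMAS AND PROOFS =====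

-- proof-side value: the longest root (by length) that is a prefix of w.drop i, as a fold
def pvBestLen (w : List Char) (i : Nat) : Nat :=
  pvRootsB.foldl (fun m r => if r <+: w.drop i ∧ m < r.length then r.length else m) 0

theorem pvRoots_perm : pvRootsSet.Perm pvRootsB := by decide

theorem pvRootsB_len : ∀ r ∈ pvRootsB, 2 ≤ r.length ∧ r.length ≤ 11 := by decide

theorem pv_slice_len (w : List Char) (i j : Nat) (hj : j ≤ w.length) :
    (PySem.List.slice w (some (i : Int)) (some (j : Int))).length = j - i := by
  rw [PySem.List.slice_natCast]
  simp
  omega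

-- reading key i after the inner range loop of pvIndexRoot
-- the body of pvIndexRoot's inner loop, named for the proofs
def pvStepF (w r : List Char) (d : PySem.Dict Int Int) (j : Nat) : PySem.Dict Int Int :=
  if PySem.Chars.startswith (w.drop j) r && decide (d.getD (j : Int) 0 < (r.length : Int)) then
    d.insert (j : Int) (r.length : Int)
  else d

theorem pvStepF_getD_ne (w r : List Char) (d : PySem.Dict Int Int) (i j : Nat) (h : i ≠ j) :
    (pvStepF w r d j).getD (i : Int) 0 = d.getD (i : Int) 0 := by
  have hne : (i : Int) ≠ (j : Int) := by exact_mod_cast h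
  unfold pvStepF
  split
  · rw [PySem.Dict.getD_insert]; rw [if_neg hne]
  · rfl

theorem pvStepF_getD_self (w r : List Char) (d : PySem.Dict Int Int) (i : Nat) :
    (pvStepF w r d i).getD (i : Int) 0 =
      if PySem.Chars.startswith (w.drop i) r = true ∧ d.getD (i : Int) 0 < (r.length : Int) then
        (r.length : Int)
      else d.getD (i : Int) 0 := by
  unfold pvStepF
  by_cases hs : PySem.Chars.startswith (w.drop i) r = true
  · by_cases hl : d.getD (i : Int) 0 < (r.length : Int)
    · rw [if_pos (by simp [hs, hl]), if_pos ⟨hs, hl⟩, PySem.Dict.getD_insert, if_pos rfl]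
    · rw [if_neg (by simp [hl]), if_neg (by intro h; exact hl h.2)]
  · rw [if_neg (by simp [hs]), if_neg (by intro h; exact hs h.1)]

theorem pvRangeFold_getD (w r : List Char) (i : Nat) :
    ∀ (m : Nat) (d : PySem.Dict Int Int),
      ((List.range m).foldl (pvStepF w r) d).getD (i : Int) 0 =
        if i < m ∧ PySem.Chars.startswith (w.drop i) r = true ∧
            d.getD (i : Int) 0 < (r.length : Int) then (r.length : Int)
        else d.getD (i : Int) 0 := by
  intro m
  induction m with
  | zero => intro d; simp
  | succ k ih =>
    intro d
    rw [List.range_succ, List.foldl_append, List.foldl_cons, List.foldl_nil]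
    by_cases him : i = k
    · subst him
      have hIH := ih d
      rw [if_neg (by omega)] at hIH
      rw [pvStepF_getD_self, hIH]
      by_cases hc : PySem.Chars.startswith (w.drop i) r = true ∧ d.getD (i : Int) 0 < (r.length : Int)
      · rw [if_pos hc, if_pos ⟨by omega, hc⟩]
      · rw [if_neg hc, if_neg (by intro h; exact hc h.2)]
    · rw [pvStepF_getD_ne w r _ i k him, ih d]
      by_cases hlt : i < k
      · by_cases hc : PySem.Chars.startswith (w.drop i) r = true ∧ d.getD (i : Int) 0 < (r.length : Int)
        · rw [if_pos ⟨hlt, hc⟩, if_pos ⟨by omega, hc⟩]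
        · rw [if_neg (by intro h; exact hc h.2), if_neg (by intro h; exact hc h.2)]
      · rw [if_neg (by intro h; exact hlt h.1), if_neg (by intro h; omega)]

theorem pvIndexRoot_getD (w r : List Char) (d : PySem.Dict Int Int) (i : Nat) :
    (pvIndexRoot w d r).getD (i : Int) 0 =
      if i + r.length ≤ w.length ∧ PySem.Chars.startswith (w.drop i) r = true ∧
          d.getD (i : Int) 0 < (r.length : Int) then (r.length : Int)
      else d.getD (i : Int) 0 := by
  have hm : i < (((w.length : Int) - (r.length : Int) + 1)).toNat ↔ i + r.length ≤ w.length := by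
    omega
  have he : pvIndexRoot w d r =
      (List.range (((w.length : Int) - (r.length : Int) + 1)).toNat).foldl (pvStepF w r) d := rfl
  rw [he, pvRangeFold_getD]
  by_cases h : i + r.length ≤ w.length
  · simp only [hm.mpr h, true_and, h, true_and]
  · rw [if_neg (by intro hc; exact h (hm.mp hc.1)), if_neg (by intro hc; exact h hc.1)]

-- the built table at position i is exactly pvBestLen
theorem pvBuildAux (w : List Char) (i : Nat) (hi : i ≤ w.length) :
    ∀ (rs : List (List Char)) (d : PySem.Dict Int Int) (m : Nat),
      d.getD (i : Int) 0 = (m : Int) →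
      (rs.foldl (pvIndexRoot w) d).getD (i : Int) 0 =
        ((rs.foldl (fun m r => if r <+: w.drop i ∧ m < r.length then r.length else m) m : Nat) : Int) := by
  intro rs
  induction rs with
  | nil => intro d m hd; simpa using hd
  | cons r rs ih =>
    intro d m hd
    simp only [List.foldl_cons]
    apply ih
    rw [pvIndexRoot_getD, hd]
    by_cases hp : r <+: w.drop i
    · have hs : PySem.Chars.startswith (w.drop i) r = true := (PySem.Chars.startswith_iff _ _).mpr hp
      have hlen : i + r.length ≤ w.length := by
        have := hp.length_le
        rw [List.length_drop] at this
        omega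
      by_cases hm : m < r.length
      · rw [if_pos ⟨hlen, hs, by exact_mod_cast hm⟩, if_pos ⟨hp, hm⟩]
      · rw [if_neg (by intro h; exact hm (by exact_mod_cast h.2.2)),
            if_neg (by intro h; exact hm h.2)]
    · have hs : PySem.Chars.startswith (w.drop i) r ≠ true := by
        intro h; exact hp ((PySem.Chars.startswith_iff _ _).mp h)
      rw [if_neg (by intro h; exact hs h.2.1), if_neg (by intro h; exact hp h.1)]

theorem pvBuild_getD (w : List Char) (i : Nat) (hi : i ≤ w.length) :
    (pvBuild w).getD (i : Int) 0 = ((pvBestLen w i : Nat) : Int) := by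
  unfold pvBuild pvBestLen
  exact pvBuildAux w i hi pvRootsB PySem.Dict.empty 0 (by simp [PySem.Dict.getD_empty])

theorem pvFoldBest_spec (s : List Char) (rs : List (List Char)) :
    ∀ m, (rs.foldl (fun m r => if r <+: s ∧ m < r.length then r.length else m) m = m ∨
        ∃ r ∈ rs, r <+: s ∧
          rs.foldl (fun m r => if r <+: s ∧ m < r.length then r.length else m) m = r.length) ∧
      (∀ r ∈ rs, r <+: s →
        r.length ≤ rs.foldl (fun m r => if r <+: s ∧ m < r.length then r.length else m) m) ∧
      m ≤ rs.foldl (fun m r => if r <+: s ∧ m < r.length then r.length else m) m := by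
  induction rs with
  | nil => intro m; simp
  | cons r rs ih =>
    intro m
    simp only [List.foldl_cons]
    by_cases h : r <+: s ∧ m < r.length
    · rw [if_pos h]
      obtain ⟨h1, h2, h3⟩ := ih r.length
      refine ⟨?_, ?_, ?_⟩
      · rcases h1 with h1 | ⟨r', hr', hp', he'⟩
        · exact Or.inr ⟨r, by simp, h.1, h1⟩
        · exact Or.inr ⟨r', by simp [hr'], hp', he'⟩
      · intro r' hr' hp'
        rcases List.mem_cons.mp hr' with rfl | hr'
        · exact h3
        · exact h2 r' hr' hp'
      · omega
    · rw [if_neg h]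
      obtain ⟨h1, h2, h3⟩ := ih m
      refine ⟨?_, ?_, ?_⟩
      · rcases h1 with h1 | ⟨r', hr', hp', he'⟩
        · exact Or.inl h1
        · exact Or.inr ⟨r', by simp [hr'], hp', he'⟩
      · intro r' hr' hp'
        rcases List.mem_cons.mp hr' with rfl | hr'
        · by_cases hm : m < r'.length
          · exact absurd ⟨hp', hm⟩ h
          · omega
        · exact h2 r' hr' hp'
      · exact h3

theorem pvBestLen_cases (w : List Char) (i : Nat) :
    pvBestLen w i = 0 ∨ ∃ r ∈ pvRootsB, r <+: w.drop i ∧ pvBestLen w i = r.length := by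
  exact (pvFoldBest_spec (w.drop i) pvRootsB 0).1

theorem pvBestLen_max (w : List Char) (i : Nat) :
    ∀ r ∈ pvRootsB, r <+: w.drop i → r.length ≤ pvBestLen w i := by
  exact (pvFoldBest_spec (w.drop i) pvRootsB 0).2.1

theorem pv_slice_mem_iff (w : List Char) (i j : Nat) (_hij : i < j) (hj : j ≤ w.length) :
    PySem.List.slice w (some (i : Int)) (some (j : Int)) ∈ pvRootsSet ↔
      ∃ r ∈ pvRootsB, r <+: w.drop i ∧ r.length = j - i := by
  rw [PySem.List.slice_natCast]
  constructor
  · intro h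
    refine ⟨_, pvRoots_perm.mem_iff.mp h, List.take_prefix _ _, ?_⟩
    simp
    omega
  · rintro ⟨r, hr, hp, hl⟩
    have : (w.drop i).take (j - i) = r := by
      rw [← hl]
      exact (List.prefix_iff_eq_take.mp hp).symm
    rw [this]
    exact pvRoots_perm.mem_iff.mpr hr

theorem pvFindA_none_iff (w : List Char) (i : Nat) :
    ∀ j0, pvFindA w i j0 = none ↔
      ∀ j, i < j → j ≤ j0 → PySem.List.slice w (some (i : Int)) (some (j : Int)) ∉ pvRootsSet := by
  intro j0
  induction j0 with
  | zero =>
    simp only [pvFindA]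
    constructor
    · intro _ j h1 h2; omega
    · intro _; trivial
  | succ k ih =>
    unfold pvFindA
    by_cases h1 : k + 1 ≤ i
    · rw [if_pos h1]
      constructor
      · intro _ j hj1 hj2; omega
      · intro _; trivial
    · rw [if_neg h1]
      by_cases h2 : PySem.List.slice w (some (i : Int)) (some ((k + 1 : Nat) : Int)) ∈ pvRootsSet
      · rw [if_pos h2]
        constructor
        · intro h; exact absurd h (by simp)
        · intro h; exact absurd h2 (h (k + 1) (by omega) (by omega))
      · rw [if_neg h2]
        rw [ih]
        constructor
        · intro h j hj1 hj2
          by_cases hk : j = k + 1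
          · subst hk; exact h2
          · exact h j hj1 (by omega)
        · intro h j hj1 hj2
          exact h j hj1 (by omega)

theorem pvFindA_eq_some (w : List Char) (i t : Nat) (h1 : i < t)
    (h2 : PySem.List.slice w (some (i : Int)) (some (t : Int)) ∈ pvRootsSet) :
    ∀ j0, t ≤ j0 →
      (∀ j', t < j' → j' ≤ j0 → PySem.List.slice w (some (i : Int)) (some (j' : Int)) ∉ pvRootsSet) →
      pvFindA w i j0 = some t := by
  intro j0
  induction j0 with
  | zero => intro hle _; omega
  | succ k ih =>
    intro hle hno
    unfold pvFindA
    rw [if_neg (by omega)]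
    by_cases hm : PySem.List.slice w (some (i : Int)) (some ((k + 1 : Nat) : Int)) ∈ pvRootsSet
    · have ht : t = k + 1 := by
        by_contra hne
        exact hno (k + 1) (by omega) (by omega) hm
      rw [if_pos hm, ht]
    · rw [if_neg hm]
      have ht : t ≠ k + 1 := by intro h; rw [h] at h2; exact hm h2
      exact ih (by omega) (fun j' h1' h2' => hno j' h1' (by omega))

-- A's downward scan at position i finds exactly i + pvBestLen (or nothing)
theorem pvFindA_eq (w : List Char) (i : Nat) (hi : i < w.length) :
    pvFindA w i w.length =
      if pvBestLen w i = 0 then none else some (i + pvBestLen w i) := by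
  rcases pvBestLen_cases w i with h0 | ⟨r, hr, hp, he⟩
  · rw [if_pos h0]
    rw [pvFindA_none_iff]
    intro j hij hjn hmem
    obtain ⟨r, hr, hp, _⟩ := (pv_slice_mem_iff w i j hij hjn).mp hmem
    have h1 := pvBestLen_max w i r hr hp
    have h2 := (pvRootsB_len r hr).1
    omega
  · have hb2 := (pvRootsB_len r hr).1
    have hbpos : 0 < pvBestLen w i := by omega
    have hbound : i + pvBestLen w i ≤ w.length := by
      have := hp.length_le
      rw [List.length_drop] at this
      omega
    have hmem : PySem.List.slice w (some (i : Int)) (some ((i + pvBestLen w i : Nat) : Int)) ∈ pvRootsSet :=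
      (pv_slice_mem_iff w i (i + pvBestLen w i) (by omega) hbound).mpr ⟨r, hr, hp, by omega⟩
    rw [if_neg (by omega)]
    apply pvFindA_eq_some w i (i + pvBestLen w i) (by omega) hmem w.length hbound
    intro j' h1 h2 hmem'
    obtain ⟨r', hr', hp', hl'⟩ := (pv_slice_mem_iff w i j' (by omega) h2).mp hmem'
    have := pvBestLen_max w i r' hr' hp'
    omega

-- main loop invariant: A's parts, single letters filtered out, are B's walk over the table
theorem pvLoop_eq (w : List Char) : ∀ i,
    (pvLoopA w i).filter (fun p => decide (1 < p.length)) = pvWalk w (pvBuild w) i := by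
  intro i
  induction hwf : w.length - i using Nat.strong_induction_on generalizing i with
  | _ n ih =>
    subst hwf
    rw [pvLoopA, pvWalk]
    by_cases h : i < w.length
    · simp only [h, dif_pos]
      have hb := pvBuild_getD w i (le_of_lt h)
      cases h0 : pvBestLen w i with
      | zero =>
        have hfa : pvFindA w i w.length = (none : Option Nat) := by
          rw [pvFindA_eq w i h, if_pos h0]
        rw [hfa]
        rw [h0] at hb
        rw [hb]
        rw [dif_neg (by norm_num)]
        show ([w[i]] :: pvLoopA w (i + 1)).filter (fun p => decide (1 < p.length)) = _
        rw [List.filter_cons]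
        simp only [List.length_cons, List.length_nil]
        norm_num
        exact ih (w.length - (i + 1)) (by omega) (i + 1) rfl
      | succ b' =>
        have hbpos : 0 < pvBestLen w i := by omega
        rcases pvBestLen_cases w i with hz | ⟨r, hr, hp, he⟩
        · omega
        have hb2 := (pvRootsB_len r hr).1
        have hbound : i + pvBestLen w i ≤ w.length := by
          have := hp.length_le
          rw [List.length_drop] at this
          omega
        rw [← h0] at *
        have hfa : pvFindA w i w.length = some (i + pvBestLen w i) := by
          rw [pvFindA_eq w i h, if_neg (by omega)]
        rw [hfa, hb]
        rw [dif_pos (by exact_mod_cast hbpos)]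
        show (PySem.List.slice w (some (i : Int)) (some ((i + pvBestLen w i : Nat) : Int)) ::
            pvLoopA w (i + pvBestLen w i)).filter (fun p => decide (1 < p.length)) = _
        have hcast : (i : Int) + ((pvBestLen w i : Nat) : Int) = ((i + pvBestLen w i : Nat) : Int) := by
          push_cast; ring
        have htn : (((pvBestLen w i : Nat) : Int)).toNat = pvBestLen w i := by omega
        rw [List.filter_cons]
        have hlen : (PySem.List.slice w (some (i : Int)) (some ((i + pvBestLen w i : Nat) : Int))).length
            = pvBestLen w i := by
          rw [pv_slice_len w i (i + pvBestLen w i) hbound]; omega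
        have hkeep : decide (1 < (PySem.List.slice w (some (i : Int)) (some ((i + pvBestLen w i : Nat) : Int))).length) = true := by
          rw [hlen]; simp; omega
        rw [hkeep]
        simp only [if_true]
        rw [hcast, htn]
        rw [ih (w.length - (i + pvBestLen w i)) (by omega) (i + pvBestLen w i) rfl]
    · simp [h]

-- ===== VERDICT (by name: the statement is the Claim_ definition above) =====
theorem split_german_compound_spec : Claim_equal_split_german_compound := by
  intro word _
  unfold Spec_split_german_compound split_german_compound split_german_compound_alt
  rw [pvLoop_eq]
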